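-- pv_equiv track=rewrite | github.com/GeorgeBeshay/ProblemSolving | CF_Phase_2_2/Data_Structure/P221B_LittleElephantAndNumbers.py | TheAmazingFunction
-- ===== SOURCE A (Python) =====
-- import math
--
-- def TheAmazingFunction(X):
--     Answer = 0
--     DivisorsList = set()
--     table = dict()
--     NumbersInX = []
--     stringX = str(X)
--     # ---------------------------- SEPARATOR ----------------------------
--     for i in range(1, int(math.sqrt(X))+1):
--         if X % i == 0:
--             s = len(DivisorsList)
--             DivisorsList.add(RemoveRepeatsInNumber(i))
--             if s == len(DivisorsList):
--                 if table.get(RemoveRepeatsInNumber(i)) is None: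
--                     table.update({RemoveRepeatsInNumber(i): 2})
--                 else:
--                     table.update({RemoveRepeatsInNumber(i): table.get(RemoveRepeatsInNumber(i))+1})
--             if i != X // i:
--                 s = len(DivisorsList)
--                 DivisorsList.add(RemoveRepeatsInNumber(X // i))
--                 if s == len(DivisorsList):
--                     if table.get(RemoveRepeatsInNumber(X // i)) is None:
--                         table.update({RemoveRepeatsInNumber(X // i): 2})
--                     else:
--                         table.update({RemoveRepeatsInNumber(X // i): table.get(RemoveRepeatsInNumber(X // i))+1})
--     # ---------------------------- SEPARATOR ----------------------------
--     for i in range(10):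
--         if stringX.__contains__(str(i)):
--             NumbersInX.append(i)
--     NumbersInX = str(NumbersInX).removeprefix("[").removesuffix("]").replace(", ", "")
--     # ---------------------------- SEPARATOR ----------------------------
--     for i in range(len(DivisorsList)):
--         tempString = DivisorsList.pop()
--         tempSet = set(tempString)
--         sizeA = len(tempSet)
--         tempSet.update(NumbersInX)
--         if len(tempSet) < sizeA+len(NumbersInX):
--             if table.get(tempString) is None:
--                 Answer += 1
--             else:
--                 Answer += table.get(tempString)
--     # ---------------------------- SEPARATOR ----------------------------
--     return Answer
--
-- def RemoveRepeatsInNumber(A):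
--     A_ = set()
--     Answer = []
--     for i in range(len(str(A))):
--         A_.add(str(A)[i])
--     for i in range(len(A_)):
--         Answer.append(int(A_.pop()))
--     Answer.sort()
--     return Answer.__str__().removeprefix("[").removesuffix("]").replace(", ", "")
-- ===== SOURCE B (Python) =====
-- import math
--
-- def TheAmazingFunction(X):
--     # Count the divisors of X that share at least one decimal digit with X.
--     digits = set(str(X))
--     count = 0
--     for i in range(1, math.isqrt(X) + 1):
--         if X % i == 0:
--             if any(c in digits for c in str(i)):
--                 count += 1
--             j = X // i
--             if j != i and any(c in digits for c in str(j)):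
--                 count += 1
--     return count
-- ===== Notes on version B (the rewrite author's own statement) =====
-- stated objective: simpler
-- what changed: B counts divisors sharing a digit with X directly in the single trial-division pass via set-of-characters intersection, dropping A's digit-signature strings, the signature set, the multiplicity table and the two post-processing loops entirely.
import Mathlib
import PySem

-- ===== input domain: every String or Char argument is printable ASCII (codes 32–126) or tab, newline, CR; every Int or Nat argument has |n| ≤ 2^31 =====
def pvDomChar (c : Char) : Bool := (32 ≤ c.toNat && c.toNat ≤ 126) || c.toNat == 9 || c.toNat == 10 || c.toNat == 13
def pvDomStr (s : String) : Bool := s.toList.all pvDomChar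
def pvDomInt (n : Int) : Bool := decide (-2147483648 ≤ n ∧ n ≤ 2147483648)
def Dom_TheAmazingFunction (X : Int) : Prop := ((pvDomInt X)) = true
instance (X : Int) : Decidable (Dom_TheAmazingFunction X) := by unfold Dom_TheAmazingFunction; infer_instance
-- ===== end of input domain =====

-- B counts divisors sharing a digit with X directly in the trial-division pass (set-of-chars
-- intersection), dropping A's digit-signature strings, signature set, multiplicity table and
-- both post-processing loops; objective: simpler (same asymptotic cost).


-- ===== PORT A =====
-- Helper RemoveRepeatsInNumber: sorted distinct digits of str(A), concatenated.
-- int(ch) is ported as (ofChars? [ch]).getD 0 — exact on digit chars; at every call site reached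
-- under Pre_ (A is a positive divisor of X) all chars of str(A) are '0'..'9' (Python would raise
-- ValueError on '-'/'.', reachable only for X < 0, excluded by Pre_).
-- The Python pops the char set in hash order and then SORTS the (distinct) values, so the result
-- does not depend on pop order; we consume the set in insertion order.
-- str(list).removeprefix("[").removesuffix("]").replace(", ", "") = concatenation of str of the
-- elements (digit strings contain no ',' or ' '), ported as "".join.
def RemoveRepeatsInNumber (A : Int) : String :=
  let A_ : PySem.Set Char := (PySem.Int.toStr A).toList.foldl PySem.Set.add []
  let Answer : List Int := A_.map (fun ch => (PySem.Int.ofChars? [ch]).getD 0)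
  let Answer := PySem.List.sorted Answer (fun x => x) false
  PySem.Str.join "" (Answer.map PySem.Int.toStr)

-- int(math.sqrt(X)) is ported as Nat.sqrt X.toNat — exact for 0 ≤ X ≤ 2^31 (the double sqrt is
-- correctly rounded and cannot cross an integer at this magnitude); math.sqrt raises ValueError
-- for X < 0, excluded by Pre_.
-- The third Python loop pops every element of the set; the accumulated sum does not depend on the
-- pop order, so we consume the set in insertion order.
def TheAmazingFunction (X : Int) : Int :=
  let stringX := PySem.Int.toStr X
  let st := (PySem.List.pyRange 1 ((Nat.sqrt X.toNat : Int) + 1) 1).foldl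
    (fun (st : PySem.Set String × PySem.Dict String Int) i =>
      let DivisorsList := st.1
      let table := st.2
      if PySem.Int.mod X i == 0 then
        let s := PySem.Set.len DivisorsList
        let DivisorsList := PySem.Set.add DivisorsList (RemoveRepeatsInNumber i)
        let table :=
          if s == PySem.Set.len DivisorsList then
            match table.get? (RemoveRepeatsInNumber i) with
            | none => table.insert (RemoveRepeatsInNumber i) 2
            | some v => table.insert (RemoveRepeatsInNumber i) (v + 1)
          else table
        if i != PySem.Int.floordiv X i then
          let s := PySem.Set.len DivisorsList
          let DivisorsList := PySem.Set.add DivisorsList (RemoveRepeatsInNumber (PySem.Int.floordiv X i))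
          let table :=
            if s == PySem.Set.len DivisorsList then
              match table.get? (RemoveRepeatsInNumber (PySem.Int.floordiv X i)) with
              | none => table.insert (RemoveRepeatsInNumber (PySem.Int.floordiv X i)) 2
              | some v => table.insert (RemoveRepeatsInNumber (PySem.Int.floordiv X i)) (v + 1)
            else table
          (DivisorsList, table)
        else (DivisorsList, table)
      else (DivisorsList, table)) (PySem.Set.empty, PySem.Dict.empty)
  let NumbersInX : List Int := (PySem.List.pyRange 0 10 1).foldl
    (fun acc i => if PySem.Str.isIn (PySem.Int.toStr i) stringX then acc ++ [i] else acc) []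
  -- str(list) with "[", "]" and ", " removed = concatenation of the digit strings
  let NumbersInXStr := PySem.Str.join "" (NumbersInX.map PySem.Int.toStr)
  st.1.foldl (fun Answer tempString =>
    let tempSet : PySem.Set Char := PySem.Set.ofList tempString.toList
    let sizeA := PySem.Set.len tempSet
    let tempSet := PySem.Set.update tempSet NumbersInXStr.toList
    if PySem.Set.len tempSet < sizeA + PySem.Str.len NumbersInXStr then
      Answer + (match st.2.get? tempString with | none => 1 | some v => v)
    else Answer) 0

-- ===== PORT B =====
-- math.isqrt(X) = Nat.sqrt X.toNat for 0 ≤ X (isqrt raises ValueError for X < 0, excluded by Pre_).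
def TheAmazingFunction_alt (X : Int) : Int :=
  let digits : PySem.Set Char := PySem.Set.ofList (PySem.Int.toStr X).toList
  (PySem.List.pyRange 1 ((Nat.sqrt X.toNat : Int) + 1) 1).foldl
    (fun count i =>
      if PySem.Int.mod X i == 0 then
        let count :=
          if (PySem.Int.toStr i).toList.any (fun c => PySem.Set.contains digits c) then count + 1
          else count
        let j := PySem.Int.floordiv X i
        if j != i && (PySem.Int.toStr j).toList.any (fun c => PySem.Set.contains digits c) then
          count + 1
        else count
      else count) 0

-- ===== PRECONDITION & SPEC =====
-- Python A raises ValueError (math.sqrt of a negative number) for X < 0; both programs return on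
-- every X ≥ 0.
def Pre_TheAmazingFunction (X : Int) : Prop := 0 ≤ X
instance (X : Int) : Decidable (Pre_TheAmazingFunction X) := by unfold Pre_TheAmazingFunction; infer_instance
def pvWitness_TheAmazingFunction : Int := 10

def Spec_TheAmazingFunction (X : Int) (out : Int) : Prop := out = TheAmazingFunction_alt X
instance (X : Int) (out : Int) : Decidable (Spec_TheAmazingFunction X out) := by unfold Spec_TheAmazingFunction; infer_instance

-- ===== CLAIM (what is proved, stated in full; the proofs are below) =====
def Claim_equal_TheAmazingFunction : Prop := ∀ (X : Int), Dom_TheAmazingFunction X → Pre_TheAmazingFunction X → Spec_TheAmazingFunction X (TheAmazingFunction X)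

-- ===== LEMMAS AND PROOFS =====

-- The ten decimal digit characters.
def pvDIG : List Char := ['0', '1', '2', '3', '4', '5', '6', '7', '8', '9']

-- A's loop-step on the (DivisorsList, table) state, and B's loop-step on the counter.
def pvStepA (X : Int) (st : PySem.Set String × PySem.Dict String Int) (i : Int) :
    PySem.Set String × PySem.Dict String Int :=
  let DivisorsList := st.1
  let table := st.2
  if PySem.Int.mod X i == 0 then
    let s := PySem.Set.len DivisorsList
    let DivisorsList := PySem.Set.add DivisorsList (RemoveRepeatsInNumber i)
    let table :=
      if s == PySem.Set.len DivisorsList then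
        match table.get? (RemoveRepeatsInNumber i) with
        | none => table.insert (RemoveRepeatsInNumber i) 2
        | some v => table.insert (RemoveRepeatsInNumber i) (v + 1)
      else table
    if i != PySem.Int.floordiv X i then
      let s := PySem.Set.len DivisorsList
      let DivisorsList := PySem.Set.add DivisorsList (RemoveRepeatsInNumber (PySem.Int.floordiv X i))
      let table :=
        if s == PySem.Set.len DivisorsList then
          match table.get? (RemoveRepeatsInNumber (PySem.Int.floordiv X i)) with
          | none => table.insert (RemoveRepeatsInNumber (PySem.Int.floordiv X i)) 2
          | some v => table.insert (RemoveRepeatsInNumber (PySem.Int.floordiv X i)) (v + 1)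
        else table
      (DivisorsList, table)
    else (DivisorsList, table)
  else (DivisorsList, table)

def pvStepB (X : Int) (count : Int) (i : Int) : Int :=
  if PySem.Int.mod X i == 0 then
    let count :=
      if (PySem.Int.toStr i).toList.any
          (fun c => PySem.Set.contains (PySem.Set.ofList (PySem.Int.toStr X).toList) c) then count + 1
      else count
    let j := PySem.Int.floordiv X i
    if j != i && (PySem.Int.toStr j).toList.any
        (fun c => PySem.Set.contains (PySem.Set.ofList (PySem.Int.toStr X).toList) c) then count + 1
    else count
  else count

-- A's "NumbersInX" string.
def pvNX (X : Int) : String :=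
  PySem.Str.join "" (((PySem.List.pyRange 0 10 1).foldl
    (fun acc i => if PySem.Str.isIn (PySem.Int.toStr i) (PySem.Int.toStr X) then acc ++ [i] else acc)
    []).map PySem.Int.toStr)

-- A-third-loop weight of one signature string.
def pvW (X : Int) (T : PySem.Dict String Int) (sig : String) : Int :=
  if PySem.Set.len (PySem.Set.update (PySem.Set.ofList sig.toList) (pvNX X).toList)
      < PySem.Set.len (PySem.Set.ofList sig.toList) + PySem.Str.len (pvNX X) then
    (match T.get? sig with | none => 1 | some v => v)
  else 0

-- One divisor processed the A way / the B way.
def pvProcA (st : PySem.Set String × PySem.Dict String Int) (d : Int) :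
    PySem.Set String × PySem.Dict String Int :=
  (PySem.Set.add st.1 (RemoveRepeatsInNumber d),
   if PySem.Set.len st.1 == PySem.Set.len (PySem.Set.add st.1 (RemoveRepeatsInNumber d)) then
     match st.2.get? (RemoveRepeatsInNumber d) with
     | none => st.2.insert (RemoveRepeatsInNumber d) 2
     | some v => st.2.insert (RemoveRepeatsInNumber d) (v + 1)
   else st.2)

def pvShares (X d : Int) : Bool :=
  (PySem.Int.toStr d).toList.any
    (fun c => PySem.Set.contains (PySem.Set.ofList (PySem.Int.toStr X).toList) c)

-- The invariant carried through the divisor loop.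
def pvInv (X : Int) (S : PySem.Set String) (T : PySem.Dict String Int) (c : Int) : Prop :=
  S.Nodup ∧ (∀ sig, T.contains sig = true → sig ∈ S) ∧ (S.map (pvW X T)).sum = c

lemma pv_digitChar_mem (k : Nat) (h : k < 10) : k.digitChar ∈ pvDIG := by
  interval_cases k <;> decide

lemma pv_toDigitsCore_mem (f : Nat) : ∀ (n : Nat) (acc : List Char) (c : Char),
    c ∈ Nat.toDigitsCore 10 f n acc → c ∈ acc ∨ c ∈ pvDIG := by
  induction f with
  | zero => intro n acc c h; exact Or.inl h
  | succ f ih =>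
    intro n acc c h
    simp only [Nat.toDigitsCore] at h
    by_cases h0 : n / 10 = 0
    · rw [if_pos h0] at h
      rcases List.mem_cons.mp h with h | h
      · exact Or.inr (h ▸ pv_digitChar_mem _ (Nat.mod_lt _ (by norm_num)))
      · exact Or.inl h
    · rw [if_neg h0] at h
      rcases ih _ _ _ h with h | h
      · rcases List.mem_cons.mp h with h | h
        · exact Or.inr (h ▸ pv_digitChar_mem _ (Nat.mod_lt _ (by norm_num)))
        · exact Or.inl h
      · exact Or.inr h

lemma pv_mem_toChars_digit {d : Int} (hd : 0 ≤ d) {c : Char} (h : c ∈ PySem.Int.toChars d) :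
    c ∈ pvDIG := by
  unfold PySem.Int.toChars at h
  rw [if_neg (by omega)] at h
  rcases pv_toDigitsCore_mem _ _ _ _ h with h | h
  · exact absurd h (List.not_mem_nil)
  · exact h

-- int(c) then str(...) round-trips a digit character.
lemma pv_toChars_val {c : Char} (h : c ∈ pvDIG) :
    PySem.Int.toChars ((PySem.Int.ofChars? [c]).getD 0) = [c] := by
  fin_cases h <;> decide

lemma pv_join_nil_flatten (l : List (List Char)) : PySem.Chars.join [] l = l.flatten := by
  induction l with
  | nil => rfl
  | cons h t ih => cases t <;> simp_all [PySem.Chars.join, List.intercalate, List.intersperse]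

-- Membership in the digit-signature string = membership among the digits.
lemma pv_mem_rrn {d : Int} (hd : 0 ≤ d) (c : Char) :
    c ∈ (RemoveRepeatsInNumber d).toList ↔ c ∈ PySem.Int.toChars d := by
  unfold RemoveRepeatsInNumber
  rw [PySem.Str.toList_join, ← PySem.Set.ofList_eq_foldl]
  rw [show ("" : String).toList = ([] : List Char) from rfl, List.map_map, pv_join_nil_flatten]
  simp only [List.mem_flatten, List.mem_map]
  constructor
  · rintro ⟨p, ⟨v, hv, rfl⟩, hc⟩
    have hv' := (PySem.List.sorted_perm _ _ _).mem_iff.mp hv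
    rcases List.mem_map.mp hv' with ⟨c0, hc0, rfl⟩
    have hc0' : c0 ∈ PySem.Int.toChars d := by
      have := PySem.Set.mem_ofList (xs := (PySem.Int.toStr d).toList) (y := c0) |>.mp hc0
      rwa [PySem.Int.toList_toStr] at this
    have hdig := pv_mem_toChars_digit hd hc0'
    simp only [Function.comp_apply, PySem.Int.toList_toStr, pv_toChars_val hdig] at hc
    rcases List.mem_singleton.mp hc with rfl
    exact hc0'
  · intro hc
    have hdig := pv_mem_toChars_digit hd hc
    have hmem : c ∈ (PySem.Set.ofList (PySem.Int.toStr d).toList : PySem.Set Char) := by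
      rw [PySem.Set.mem_ofList, PySem.Int.toList_toStr]; exact hc
    refine ⟨(PySem.Int.toStr ((PySem.Int.ofChars? [c]).getD 0)).toList, ⟨(PySem.Int.ofChars? [c]).getD 0, ?_, rfl⟩, ?_⟩
    · exact (PySem.List.sorted_perm _ _ _).mem_iff.mpr
        (List.mem_map.mpr ⟨c, hmem, rfl⟩)
    · rw [PySem.Int.toList_toStr, pv_toChars_val hdig]; exact List.mem_singleton.mpr rfl

-- |s ∪ l| < |s| + |l| iff some element of l is already in s (l without repeats).
lemma pv_union_card {α : Type} [BEq α] [LawfulBEq α] (s : PySem.Set α) (l : List α)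
    (hl : l.Nodup) :
    PySem.Set.len (PySem.Set.update s l) < PySem.Set.len s + (l.length : Int) ↔
      ∃ x ∈ l, x ∈ s := by
  rw [PySem.Set.update_eq_append_filter, PySem.Set.ofList_eq_self_of_nodup l hl]
  simp only [PySem.Set.len, List.length_append]
  constructor
  · intro h
    have h' : (List.filter (fun y => !s.contains y) l).length < l.length := by
      push_cast at h; omega
    rcases List.length_filter_lt_length_iff_exists.mp h' with ⟨x, hx, hx'⟩
    exact ⟨x, hx, (PySem.Set.contains_iff s x).mp (by simpa using hx')⟩
  · rintro ⟨x, hx, hx'⟩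
    have h' : (List.filter (fun y => !s.contains y) l).length < l.length :=
      List.length_filter_lt_length_iff_exists.mpr ⟨x, hx, by simpa using hx'⟩
    push_cast; omega

lemma pv_toChars_small {i : Int} (h0 : 0 ≤ i) (h : i < 10) :
    PySem.Int.toChars i = [Char.ofNat (48 + i.toNat)] := by
  interval_cases i <;> decide

-- NumbersInX as a mapped filter.
lemma pv_nx_eq (X : Int) :
    (pvNX X).toList =
      ((PySem.List.pyRange 0 10 1).filter
        (fun i => PySem.Str.isIn (PySem.Int.toStr i) (PySem.Int.toStr X))).map
        (fun i => Char.ofNat (48 + i.toNat)) := by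
  unfold pvNX
  rw [PySem.List.foldl_append_if (f := fun i => i), List.nil_append, PySem.Str.toList_join,
    List.map_map, List.map_map]
  have hmap : ∀ i ∈ (PySem.List.pyRange 0 10 1).filter
      (fun i => PySem.Str.isIn (PySem.Int.toStr i) (PySem.Int.toStr X)),
      ((String.toList ∘ PySem.Int.toStr) ∘ fun i => i) i = [Char.ofNat (48 + i.toNat)] := by
    intro i hi
    have hr := PySem.List.mem_pyRange_one.mp (List.mem_of_mem_filter hi)
    simp only [Function.comp_apply, PySem.Int.toList_toStr]
    exact pv_toChars_small hr.1 hr.2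
  rw [show ("" : String).toList = ([] : List Char) from rfl, List.map_congr_left hmap,
    show (fun i : Int => [Char.ofNat (48 + i.toNat)])
      = ((fun c => [c]) ∘ fun i : Int => Char.ofNat (48 + i.toNat)) from rfl,
    ← List.map_map, PySem.Chars.join_nil_singletons]

lemma pv_chr_inj : ∀ {i j : Int}, 0 ≤ i → i < 10 → 0 ≤ j → j < 10 →
    Char.ofNat (48 + i.toNat) = Char.ofNat (48 + j.toNat) → i = j := by
  intro i j h1 h2 h3 h4 h
  have := congrArg Char.toNat h
  rw [Char.toNat_ofNat, Char.toNat_ofNat, if_pos (Or.inl (by omega)),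
    if_pos (Or.inl (by omega))] at this
  omega

lemma pv_nx_nodup (X : Int) : (pvNX X).toList.Nodup := by
  rw [pv_nx_eq]
  refine List.Nodup.map_on ?_ ((PySem.List.nodup_pyRange_one 0 10).filter _)
  intro i hi j hj h
  have hi' := PySem.List.mem_pyRange_one.mp (List.mem_of_mem_filter hi)
  have hj' := PySem.List.mem_pyRange_one.mp (List.mem_of_mem_filter hj)
  exact pv_chr_inj hi'.1 hi'.2 hj'.1 hj'.2 h

-- Membership in NumbersInX = membership among X's digit characters (X ≥ 0).
lemma pv_mem_nx {X : Int} (hX : 0 ≤ X) (c : Char) :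
    c ∈ (pvNX X).toList ↔ c ∈ PySem.Int.toChars X := by
  rw [pv_nx_eq]
  simp only [List.mem_map, List.mem_filter]
  constructor
  · rintro ⟨i, ⟨hir, hin⟩, rfl⟩
    have hr := PySem.List.mem_pyRange_one.mp hir
    have := (PySem.Str.isIn_iff_infix _ _).mp hin
    rw [PySem.Int.toList_toStr, PySem.Int.toList_toStr, pv_toChars_small hr.1 hr.2] at this
    exact (List.singleton_infix_iff _ _).mp this
  · intro hc
    have hdig := pv_mem_toChars_digit hX hc
    have : ∃ i, i ∈ PySem.List.pyRange 0 10 1 ∧ Char.ofNat (48 + i.toNat) = c := by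
      fin_cases hdig
      exacts [⟨0, by decide, rfl⟩, ⟨1, by decide, rfl⟩, ⟨2, by decide, rfl⟩, ⟨3, by decide, rfl⟩,
        ⟨4, by decide, rfl⟩, ⟨5, by decide, rfl⟩, ⟨6, by decide, rfl⟩, ⟨7, by decide, rfl⟩,
        ⟨8, by decide, rfl⟩, ⟨9, by decide, rfl⟩]
    rcases this with ⟨i, hir, rfl⟩
    have hr := PySem.List.mem_pyRange_one.mp hir
    refine ⟨i, ⟨hir, ?_⟩, rfl⟩
    rw [PySem.Str.isIn_iff_infix, PySem.Int.toList_toStr, PySem.Int.toList_toStr,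
      pv_toChars_small hr.1 hr.2]
    exact (List.singleton_infix_iff _ _).mpr hc

-- A's third-loop sharing test on the signature of d = B's any-shared-digit test on d.
lemma pv_cond_iff {X d : Int} (hX : 0 ≤ X) (hd : 0 ≤ d) :
    (PySem.Set.len (PySem.Set.update (PySem.Set.ofList (RemoveRepeatsInNumber d).toList)
        (pvNX X).toList)
      < PySem.Set.len (PySem.Set.ofList (RemoveRepeatsInNumber d).toList)
        + PySem.Str.len (pvNX X)) ↔ pvShares X d = true := by
  rw [PySem.Str.len_eq,
    pv_union_card (PySem.Set.ofList (RemoveRepeatsInNumber d).toList) _ (pv_nx_nodup X)]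
  unfold pvShares
  rw [List.any_eq_true]
  constructor
  · rintro ⟨x, hx, hx'⟩
    rw [pv_mem_nx hX] at hx
    rw [PySem.Set.mem_ofList, pv_mem_rrn hd] at hx'
    exact ⟨x, by rwa [PySem.Int.toList_toStr], by
      rw [PySem.Set.contains_iff, PySem.Set.mem_ofList, PySem.Int.toList_toStr]; exact hx⟩
  · rintro ⟨x, hx, hx'⟩
    rw [PySem.Int.toList_toStr] at hx
    rw [PySem.Set.contains_iff, PySem.Set.mem_ofList, PySem.Int.toList_toStr] at hx'
    exact ⟨x, (pv_mem_nx hX x).mpr hx', by rw [PySem.Set.mem_ofList, pv_mem_rrn hd]; exact hx⟩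

-- Changing the weight at one element of a duplicate-free list shifts the sum by the difference.
lemma pv_sum_update {S : List String} {w w' : String → Int} {sig : String}
    (hnd : S.Nodup) (hmem : sig ∈ S) (hagree : ∀ x ∈ S, x ≠ sig → w' x = w x) :
    (S.map w').sum = (S.map w).sum + (w' sig - w sig) := by
  induction S with
  | nil => cases hmem
  | cons a t ih =>
    rcases List.mem_cons.mp hmem with rfl | hmem'
    · have : ∀ x ∈ t, w' x = w x := fun x hx =>
        hagree x (List.mem_cons_of_mem _ hx) (fun h => (List.nodup_cons.mp hnd).1 (h ▸ hx))
      simp only [List.map_cons, List.sum_cons, List.map_congr_left this]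
      ring
    · have ha : w' a = w a :=
        hagree a List.mem_cons_self (fun h => (List.nodup_cons.mp hnd).1 (h ▸ hmem'))
      simp only [List.map_cons, List.sum_cons,
        ih (List.nodup_cons.mp hnd).2 hmem' (fun x hx => hagree x (List.mem_cons_of_mem _ hx)), ha]
      ring

-- One divisor preserves the invariant.
lemma pv_proc_inv {X d : Int} (hX : 0 ≤ X) (hd : 0 ≤ d)
    {S : PySem.Set String} {T : PySem.Dict String Int} {c : Int} (h : pvInv X S T c) :
    pvInv X (pvProcA (S, T) d).1 (pvProcA (S, T) d).2
      (if pvShares X d then c + 1 else c) := by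
  obtain ⟨hnd, hTS, hsum⟩ := h
  by_cases hmem : RemoveRepeatsInNumber d ∈ S
  · -- duplicate signature: set unchanged, table weight bumped
    have hA : pvProcA (S, T) d =
        (S, T.insert (RemoveRepeatsInNumber d)
          ((match T.get? (RemoveRepeatsInNumber d) with | none => 1 | some v => v) + 1)) := by
      unfold pvProcA
      simp only [PySem.Set.add_of_mem hmem, beq_self_eq_true, if_true]
      rcases T.get? (RemoveRepeatsInNumber d) with _ | v <;> simp
    rw [hA]
    refine ⟨hnd, ?_, ?_⟩
    · intro x hx
      rw [PySem.Dict.contains_insert] at hx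
      rcases (Bool.or_eq_true _ _).mp hx with hx | hx
      · have hxe : x = RemoveRepeatsInNumber d := eq_of_beq hx
        rw [hxe]; exact hmem
      · exact hTS x hx
    · have hagree : ∀ x ∈ S, x ≠ RemoveRepeatsInNumber d →
          pvW X (T.insert (RemoveRepeatsInNumber d)
            ((match T.get? (RemoveRepeatsInNumber d) with | none => 1 | some v => v) + 1)) x
            = pvW X T x := by
        intro x hx hne
        unfold pvW
        rw [PySem.Dict.get?_insert_of_ne _ _ hne]
      rw [pv_sum_update hnd hmem hagree, hsum]
      have hw' : pvW X (T.insert (RemoveRepeatsInNumber d)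
            ((match T.get? (RemoveRepeatsInNumber d) with | none => 1 | some v => v) + 1))
            (RemoveRepeatsInNumber d)
          - pvW X T (RemoveRepeatsInNumber d) = if pvShares X d then 1 else 0 := by
        unfold pvW
        rw [PySem.Dict.get?_insert_self]
        by_cases hc : pvShares X d
        · rw [if_pos ((pv_cond_iff hX hd).mpr hc), if_pos ((pv_cond_iff hX hd).mpr hc), if_pos hc]
          rcases T.get? (RemoveRepeatsInNumber d) with _ | v <;> simp
        · rw [if_neg (fun hh => hc ((pv_cond_iff hX hd).mp hh)),
            if_neg (fun hh => hc ((pv_cond_iff hX hd).mp hh)), if_neg hc]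
          ring
      rw [hw']
      by_cases hc : pvShares X d <;> simp [hc]
  · -- new signature: appended, table unchanged
    have hA : pvProcA (S, T) d = (S ++ [RemoveRepeatsInNumber d], T) := by
      unfold pvProcA
      have hlen : (PySem.Set.len S == PySem.Set.len (S ++ [RemoveRepeatsInNumber d]))
          = false := by
        simp [PySem.Set.len]
      rw [PySem.Set.add_of_not_mem hmem]
      simp only [hlen, Bool.false_eq_true, if_false]
    rw [hA]
    refine ⟨?_, ?_, ?_⟩
    · have := PySem.Set.nodup_add S (RemoveRepeatsInNumber d) hnd
      rwa [PySem.Set.add_of_not_mem hmem] at this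
    · intro x hx
      exact List.mem_append_left _ (hTS x hx)
    · rw [List.map_append, List.sum_append, hsum, List.map_singleton, List.sum_singleton]
      have hTnone : T.get? (RemoveRepeatsInNumber d) = none := by
        rw [PySem.Dict.get?_eq_none_iff_contains]
        by_contra hcon
        exact hmem (hTS _ (by revert hcon; cases T.contains (RemoveRepeatsInNumber d) <;> simp))
      have hw : pvW X T (RemoveRepeatsInNumber d) = if pvShares X d then 1 else 0 := by
        unfold pvW
        rw [hTnone]
        by_cases hc : pvShares X d
        · rw [if_pos ((pv_cond_iff hX hd).mpr hc), if_pos hc]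
        · rw [if_neg (fun hh => hc ((pv_cond_iff hX hd).mp hh)), if_neg hc]
      rw [hw]
      by_cases hc : pvShares X d <;> simp [hc]

-- One range element (i ≥ 1) preserves the invariant.
lemma pv_step_inv {X i : Int} (hX : 0 ≤ X) (hi : 1 ≤ i)
    {S : PySem.Set String} {T : PySem.Dict String Int} {c : Int} (h : pvInv X S T c) :
    pvInv X (pvStepA X (S, T) i).1 (pvStepA X (S, T) i).2 (pvStepB X c i) := by
  have hquot : 0 ≤ PySem.Int.floordiv X i := by
    rw [PySem.Int.floordiv_eq_ediv_of_pos (by omega)]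
    exact Int.ediv_nonneg hX (by omega)
  by_cases hmod : (PySem.Int.mod X i == 0) = true
  · have h1 := pv_proc_inv hX (by omega : (0:Int) ≤ i) h
    by_cases hne : (i != PySem.Int.floordiv X i) = true
    · have h2 := pv_proc_inv hX hquot h1
      have hA : pvStepA X (S, T) i =
          pvProcA (pvProcA (S, T) i) (PySem.Int.floordiv X i) := by
        unfold pvStepA pvProcA
        rw [if_pos hmod, if_pos hne]
      have hB : pvStepB X c i =
          (if pvShares X (PySem.Int.floordiv X i) then
            (if pvShares X i then c + 1 else c) + 1
          else (if pvShares X i then c + 1 else c)) := by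
        unfold pvStepB pvShares
        rw [if_pos hmod]
        have hne' : (PySem.Int.floordiv X i != i) = true := by
          simp only [bne_iff_ne] at hne ⊢
          exact fun hh => hne hh.symm
        simp only [hne', Bool.true_and]
      rw [hA, hB]
      exact h2
    · have hA : pvStepA X (S, T) i = pvProcA (S, T) i := by
        unfold pvStepA pvProcA
        rw [if_pos hmod, if_neg (by simpa using hne)]
      have hB : pvStepB X c i = (if pvShares X i then c + 1 else c) := by
        unfold pvStepB pvShares
        rw [if_pos hmod]
        have hne' : (PySem.Int.floordiv X i != i) = false := by
          simp only [bne_iff_ne] at hne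
          simp only [bne_eq_false_iff_eq]
          omega
        simp only [hne', Bool.false_and, Bool.false_eq_true, if_false]
      rw [hA, hB]
      exact h1
  · have hA : pvStepA X (S, T) i = (S, T) := by
      unfold pvStepA
      rw [if_neg hmod]
    have hB : pvStepB X c i = c := by
      unfold pvStepB
      rw [if_neg hmod]
    rw [hA, hB]
    exact h

lemma pv_fold_inv {X : Int} (hX : 0 ≤ X) (L : List Int) (hL : ∀ i ∈ L, 1 ≤ i) :
    ∀ (S : PySem.Set String) (T : PySem.Dict String Int) (c : Int), pvInv X S T c →
      pvInv X (L.foldl (pvStepA X) (S, T)).1 (L.foldl (pvStepA X) (S, T)).2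
        (L.foldl (pvStepB X) c) := by
  induction L with
  | nil => intro S T c h; exact h
  | cons a t ih =>
    intro S T c h
    have hstep := pv_step_inv hX (hL a List.mem_cons_self) h
    simp only [List.foldl_cons]
    have : pvStepA X (S, T) a = ((pvStepA X (S, T) a).1, (pvStepA X (S, T) a).2) := rfl
    rw [this]
    exact ih (fun i hi => hL i (List.mem_cons_of_mem _ hi)) _ _ _ hstep

-- The A port's third loop is the sum of weights.
lemma pv_phase3_eq (X : Int) (S : List String) (T : PySem.Dict String Int) (a : Int) :
    S.foldl (fun Answer tempString =>
      let tempSet : PySem.Set Char := PySem.Set.ofList tempString.toList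
      let sizeA := PySem.Set.len tempSet
      let tempSet := PySem.Set.update tempSet (pvNX X).toList
      if PySem.Set.len tempSet < sizeA + PySem.Str.len (pvNX X) then
        Answer + (match T.get? tempString with | none => 1 | some v => v)
      else Answer) a = a + (S.map (pvW X T)).sum := by
  have hbody : (fun (Answer : Int) (tempString : String) =>
      let tempSet : PySem.Set Char := PySem.Set.ofList tempString.toList
      let sizeA := PySem.Set.len tempSet
      let tempSet := PySem.Set.update tempSet (pvNX X).toList
      if PySem.Set.len tempSet < sizeA + PySem.Str.len (pvNX X) then
        Answer + (match T.get? tempString with | none => 1 | some v => v)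
      else Answer) = fun Answer tempString => Answer + pvW X T tempString := by
    funext a' x
    simp only [pvW]
    split <;> simp
  rw [hbody, PySem.List.foldl_add]

-- ===== VERDICT (by name: the statement is the Claim_ definition above) =====
theorem TheAmazingFunction_spec : Claim_equal_TheAmazingFunction := by
  intro X _ hX
  unfold Spec_TheAmazingFunction
  have hrange : ∀ i ∈ PySem.List.pyRange 1 ((Nat.sqrt X.toNat : Int) + 1) 1, 1 ≤ i :=
    fun i hi => (PySem.List.mem_pyRange_one.mp hi).1
  have hinit : pvInv X PySem.Set.empty PySem.Dict.empty 0 := by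
    refine ⟨List.nodup_nil, ?_, rfl⟩
    intro sig h
    rw [PySem.Dict.contains_empty] at h
    cases h
  obtain ⟨-, -, hsum⟩ :=
    pv_fold_inv hX _ hrange PySem.Set.empty PySem.Dict.empty 0 hinit
  have hA : TheAmazingFunction X =
      (((PySem.List.pyRange 1 ((Nat.sqrt X.toNat : Int) + 1) 1).foldl (pvStepA X)
        (PySem.Set.empty, PySem.Dict.empty)).1).foldl
        (fun Answer tempString =>
          let tempSet : PySem.Set Char := PySem.Set.ofList tempString.toList
          let sizeA := PySem.Set.len tempSet
          let tempSet := PySem.Set.update tempSet (pvNX X).toList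
          if PySem.Set.len tempSet < sizeA + PySem.Str.len (pvNX X) then
            Answer + (match (((PySem.List.pyRange 1 ((Nat.sqrt X.toNat : Int) + 1) 1).foldl
                (pvStepA X) (PySem.Set.empty, PySem.Dict.empty)).2).get? tempString with
              | none => 1 | some v => v)
          else Answer) 0 := rfl
  have hB : TheAmazingFunction_alt X =
      (PySem.List.pyRange 1 ((Nat.sqrt X.toNat : Int) + 1) 1).foldl (pvStepB X) 0 := rfl
  rw [hA, hB, pv_phase3_eq, zero_add]
  exact hsum
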